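-- pv_equiv track=rewrite | github.com/itpp-labs/DINAR | workflow-files/branch2odoo_version.py | branch2version
-- ===== SOURCE A (Python) =====
-- ODOO_VERSIONS = ["master", "14.0", "13.0", "12.0", "11.0", "10.0", "9.0", "8.0", "7.0"]
--
-- def branch2version(branch):
--     branch = branch.rstrip()
--     if branch in ODOO_VERSIONS:
--         return branch
--
--     for v in ODOO_VERSIONS:
--         if branch.startswith("%s-" % v):
--             return v
--
--     return ODOO_VERSIONS[0]
-- ===== SOURCE B (Python) =====
-- ODOO_VERSIONS = ["master", "14.0", "13.0", "12.0", "11.0", "10.0", "9.0", "8.0", "7.0"]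
--
-- def branch2version(branch):
--     prefix = branch.rstrip().split("-", 1)[0]
--     return prefix if prefix in ODOO_VERSIONS else ODOO_VERSIONS[0]
-- ===== Notes on version B (the rewrite author's own statement) =====
-- stated objective: simpler
-- what changed: Replaces the exact-match test plus per-version startswith scan by extracting the part before the first dash once and doing a single membership lookup; correct because no version string contains a dash.
import Mathlib
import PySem

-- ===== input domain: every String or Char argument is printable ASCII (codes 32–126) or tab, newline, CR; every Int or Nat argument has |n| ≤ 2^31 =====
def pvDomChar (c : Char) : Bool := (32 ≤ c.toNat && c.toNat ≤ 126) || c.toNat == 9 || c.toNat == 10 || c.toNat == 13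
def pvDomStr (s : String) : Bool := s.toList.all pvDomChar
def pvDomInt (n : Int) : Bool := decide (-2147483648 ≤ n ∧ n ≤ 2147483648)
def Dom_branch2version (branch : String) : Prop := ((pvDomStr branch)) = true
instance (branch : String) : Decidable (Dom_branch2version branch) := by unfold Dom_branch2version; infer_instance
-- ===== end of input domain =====

-- B replaces A's exact-match test plus per-version startswith scan by one extraction of the
-- part before the first dash and a single membership lookup (simpler; same behaviour since
-- no version string contains a dash).


def ODOO_VERSIONS : List String := ["master", "14.0", "13.0", "12.0", "11.0", "10.0", "9.0", "8.0", "7.0"]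

-- ===== PORT A =====
-- the `for v in ODOO_VERSIONS: if branch.startswith("%s-" % v): return v` loop of A
def b2vLoop (b : String) : List String → String
  | [] => ODOO_VERSIONS.headD ""
  | v :: rest => if PySem.Str.startswith b (v ++ "-") then v else b2vLoop b rest

def branch2version (branch : String) : String :=
  let b := PySem.Str.rstrip branch
  if b ∈ ODOO_VERSIONS then b else b2vLoop b ODOO_VERSIONS

-- ===== PORT B =====
def branch2version_alt (branch : String) : String :=
  -- branch.rstrip().split("-", 1)[0]; the split list is never empty and the separator is
  -- non-empty, so the getD/headD defaults are unreachable totalization only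
  let pre := ((PySem.Str.splitMax? (PySem.Str.rstrip branch) "-" 1).getD []).headD ""
  if pre ∈ ODOO_VERSIONS then pre else ODOO_VERSIONS.headD ""

-- ===== PRECONDITION & SPEC =====
def Spec_branch2version (branch : String) (out : String) : Prop := out = branch2version_alt branch
instance (branch : String) (out : String) : Decidable (Spec_branch2version branch out) := by unfold Spec_branch2version; infer_instance

-- ===== CLAIM (what is proved, stated in full; the proofs are below) =====
def Claim_equal_branch2version : Prop := ∀ (branch : String), Dom_branch2version branch → Spec_branch2version branch (branch2version branch)

-- ===== LEMMAS AND PROOFS =====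

-- head of split("-", 1): everything before the first dash
theorem splitGo_head (l : List Char) : ∀ cur (fuel : Nat), l.length < fuel →
    ∃ r, PySem.Chars.splitOnMax.go ['-'] fuel 1 l cur [] =
      (cur.reverse ++ l.takeWhile (fun c => c ≠ '-')) :: r := by
  induction l with
  | nil =>
    intro cur fuel h
    match fuel, h with
    | fuel+1, _ => exact ⟨[], by simp [PySem.Chars.splitOnMax.go]⟩
  | cons c rest ih =>
    intro cur fuel h
    match fuel, h with
    | fuel+1, h =>
      by_cases hc : c = '-'
      · subst hc
        refine ⟨[rest], ?_⟩
        simp [PySem.Chars.splitOnMax.go, List.isPrefixOf]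
        cases fuel with
        | zero => simp [PySem.Chars.splitOnMax.go]
        | succ fuel => cases rest <;> simp [PySem.Chars.splitOnMax.go]
      · have hpre : (['-'] : List Char).isPrefixOf (c :: rest) = false := by
          simp [List.isPrefixOf]; exact fun h => absurd h.symm hc
        obtain ⟨r, hr⟩ := ih (c :: cur) fuel (by simpa using h)
        refine ⟨r, ?_⟩
        simp [PySem.Chars.splitOnMax.go, hpre, hr, hc]

theorem split_head (cs : List Char) :
    ∃ r, PySem.Chars.splitOnMax cs ['-'] 1 = cs.takeWhile (fun c => c ≠ '-') :: r := by
  have := splitGo_head cs [] (cs.length + 1) (by omega)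
  simpa [PySem.Chars.splitOnMax] using this

theorem prefix_dash_mem (v cs : List Char) (h : (v ++ ['-']) <+: cs) : '-' ∈ cs := by
  have : '-' ∈ v ++ ['-'] := by simp
  exact h.subset this

-- a dash-free prefix ending in a dash is determined by the first dash of the string
theorem dashfree_prefix_unique (v : List Char) : ∀ p rest, '-' ∉ v → '-' ∉ p →
    (v ++ ['-']) <+: (p ++ '-' :: rest) → v = p := by
  induction v with
  | nil =>
    intro p rest _ hp h
    cases p with
    | nil => rfl
    | cons a p' =>
      obtain ⟨t, ht⟩ := h
      simp at ht
      exact absurd (List.mem_cons_self ..) (ht.1 ▸ hp)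
  | cons c v' ih =>
    intro p rest hv hp h
    cases p with
    | nil =>
      obtain ⟨t, ht⟩ := h
      simp at ht
      exact absurd (List.mem_cons_self ..) (ht.1 ▸ hv)
    | cons a p' =>
      obtain ⟨t, ht⟩ := h
      simp at ht
      obtain ⟨hca, hrest⟩ := ht
      have := ih p' rest (fun m => hv (List.mem_cons_of_mem _ m)) (fun m => hp (List.mem_cons_of_mem _ m)) ⟨t, by simpa using hrest⟩
      simp [hca, this]

theorem dash_decomp (cs : List Char) (h : '-' ∈ cs) :
    ∃ rest, cs = cs.takeWhile (fun c => c ≠ '-') ++ '-' :: rest := by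
  induction cs with
  | nil => simp at h
  | cons c rest ih =>
    by_cases hc : c = '-'
    · subst hc; exact ⟨rest, by simp⟩
    · have : '-' ∈ rest := by cases h with | head => exact absurd rfl hc | tail _ h => exact h
      obtain ⟨r, hr⟩ := ih this
      exact ⟨r, by simp [hc]; simpa using hr⟩

theorem versions_dashfree : ∀ v ∈ ODOO_VERSIONS, '-' ∉ v.toList := by decide

theorem loop_none (b : String) (V : List String)
    (h : ∀ v ∈ V, PySem.Str.startswith b (v ++ "-") = false) :
    b2vLoop b V = ODOO_VERSIONS.headD "" := by
  induction V with
  | nil => rfl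
  | cons v rest ih =>
    have hv := h v (List.mem_cons_self ..)
    rw [b2vLoop, hv]
    simp only [Bool.false_eq_true, if_false]
    exact ih fun w hw => h w (List.mem_cons_of_mem _ hw)

theorem loop_found (b : String) (p : String) (rest : List Char)
    (hdec : b.toList = p.toList ++ '-' :: rest) (hpdf : '-' ∉ p.toList) :
    ∀ V, (∀ v ∈ V, '-' ∉ v.toList) → p ∈ V → b2vLoop b V = p := by
  intro V
  induction V with
  | nil => intro _ h; simp at h
  | cons v rest' ih =>
    intro hdf hm
    by_cases hs : PySem.Str.startswith b (v ++ "-") = true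
    · have hpref : (v.toList ++ ['-']) <+: b.toList := by
        have := hs
        simp only [PySem.Str.startswith_eq, String.toList_append] at this
        have h2 : ("-" : String).toList = ['-'] := by simp
        rw [h2] at this
        exact (PySem.Chars.startswith_iff _ _).mp this
      rw [hdec] at hpref
      have := dashfree_prefix_unique v.toList p.toList rest (hdf v (List.mem_cons_self ..)) hpdf hpref
      have hv : v = p := String.toList_inj.mp this
      rw [b2vLoop, hs]; simp [hv]
    · have hvp : v ≠ p := by
        intro he
        apply hs
        subst he
        simp only [PySem.Str.startswith_eq, String.toList_append]
        have h2 : ("-" : String).toList = ['-'] := by simp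
        rw [h2]
        exact (PySem.Chars.startswith_iff _ _).mpr ⟨rest, by rw [hdec]; simp⟩
      have hm' : p ∈ rest' := by cases hm with | head => exact absurd rfl hvp | tail _ h => exact h
      rw [b2vLoop, eq_false_of_ne_true hs]
      simp only [Bool.false_eq_true, if_false]
      exact ih (fun w hw => hdf w (List.mem_cons_of_mem _ hw)) hm'

theorem b2v_main (branch : String) :
    (let b := PySem.Str.rstrip branch
     if b ∈ ODOO_VERSIONS then b else b2vLoop b ODOO_VERSIONS) =
    (let pre := ((PySem.Str.splitMax? (PySem.Str.rstrip branch) "-" 1).getD []).headD ""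
     if pre ∈ ODOO_VERSIONS then pre else ODOO_VERSIONS.headD "") := by
  set b := PySem.Str.rstrip branch with hb
  obtain ⟨r, hr⟩ := split_head b.toList
  have hpre : ((PySem.Str.splitMax? b "-" 1).getD []).headD "" =
      String.ofList (b.toList.takeWhile (fun c => c ≠ '-')) := by
    have h2 : ("-" : String).toList = ['-'] := by simp
    simp [PySem.Str.splitMax?, PySem.Chars.splitMax?, h2, hr]
  rw [hpre]
  by_cases hd : '-' ∈ b.toList
  · have hnotin : b ∉ ODOO_VERSIONS := fun hm => versions_dashfree b hm hd
    obtain ⟨rest, hdec⟩ := dash_decomp b.toList hd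
    set p := String.ofList (b.toList.takeWhile (fun c => c ≠ '-')) with hp
    have hpl : p.toList = b.toList.takeWhile (fun c => c ≠ '-') := String.toList_ofList
    have hpdf : '-' ∉ p.toList := by
      rw [hpl]; intro hmem
      have := List.mem_takeWhile_imp hmem
      simp at this
    simp only [if_neg hnotin]
    by_cases hm : p ∈ ODOO_VERSIONS
    · rw [if_pos hm]
      exact loop_found b p rest (by rw [hdec, hpl]) hpdf ODOO_VERSIONS versions_dashfree hm
    · rw [if_neg hm]
      apply loop_none
      intro v hv
      by_contra hs
      have hs : PySem.Str.startswith b (v ++ "-") = true := by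
        cases h : PySem.Str.startswith b (v ++ "-") with | true => rfl | false => exact absurd h hs
      have hpref : (v.toList ++ ['-']) <+: b.toList := by
        simp only [PySem.Str.startswith_eq, String.toList_append] at hs
        have h2 : ("-" : String).toList = ['-'] := by simp
        rw [h2] at hs
        exact (PySem.Chars.startswith_iff _ _).mp hs
      rw [hdec] at hpref
      have heq := dashfree_prefix_unique v.toList _ rest (versions_dashfree v hv) (hpl ▸ hpdf) hpref
      exact hm (String.toList_inj.mp (heq.trans hpl.symm) ▸ hv)
  · have hself : b.toList.takeWhile (fun c => c ≠ '-') = b.toList := by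
      apply List.takeWhile_eq_self_iff.mpr
      intro a ha
      simp
      exact fun he => hd (he ▸ ha)
    rw [hself, String.ofList_toList]
    by_cases hm : b ∈ ODOO_VERSIONS
    · simp [hm]
    · rw [if_neg hm, if_neg hm]
      apply loop_none
      intro v hv
      by_contra hs
      have hs : PySem.Str.startswith b (v ++ "-") = true := by
        cases h : PySem.Str.startswith b (v ++ "-") with | true => rfl | false => exact absurd h hs
      simp only [PySem.Str.startswith_eq, String.toList_append] at hs
      have h2 : ("-" : String).toList = ['-'] := by simp
      rw [h2] at hs
      exact hd (prefix_dash_mem _ _ ((PySem.Chars.startswith_iff _ _).mp hs))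

-- ===== VERDICT (by name: the statement is the Claim_ definition above) =====
theorem branch2version_spec : Claim_equal_branch2version := by
  intro branch _
  unfold Spec_branch2version branch2version branch2version_alt
  exact b2v_main branch
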